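-- pv_equiv track=rewrite | github.com/tianren/psm | psm.py | enum_subsquence
-- ===== SOURCE A (Python) =====
-- def enum_subsquence(par):
--     if len(par) == 0:
--         yield tuple()
--     else:
--         tail = par[-1]
--         tailstart = par.index(tail)
--         tailcount = len(par) - tailstart
--         for _head in enum_subsquence(par[:tailstart]):
--             yield _head
--             for i in range(tailcount):
--                 _head = _head + (tail,)
--                 yield _head
-- ===== SOURCE B (Python) =====
-- def enum_subsquence(par):
--     # peel groups off the end: (value, positional count len(p)-p.index(value))
--     groups = []
--     p = list(par)
--     while p:
--         v = p[-1]
--         s = p.index(v)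
--         groups.append((v, len(p) - s))
--         p = p[:s]
--     groups.reverse()  # outer-to-inner order
--     acc = [()]
--     for v, c in groups:
--         acc = [h + (v,) * i for h in acc for i in range(c + 1)]
--     yield from acc
-- ===== Notes on version B (the rewrite author's own statement) =====
-- stated objective: alternative
-- what changed: Replaced the nested generator recursion by an explicit two-phase algorithm: one peeling pass collects (value, positional-count) groups, then a single iterative product-style fold over the reversed groups builds all subsequences.
import Mathlib
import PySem

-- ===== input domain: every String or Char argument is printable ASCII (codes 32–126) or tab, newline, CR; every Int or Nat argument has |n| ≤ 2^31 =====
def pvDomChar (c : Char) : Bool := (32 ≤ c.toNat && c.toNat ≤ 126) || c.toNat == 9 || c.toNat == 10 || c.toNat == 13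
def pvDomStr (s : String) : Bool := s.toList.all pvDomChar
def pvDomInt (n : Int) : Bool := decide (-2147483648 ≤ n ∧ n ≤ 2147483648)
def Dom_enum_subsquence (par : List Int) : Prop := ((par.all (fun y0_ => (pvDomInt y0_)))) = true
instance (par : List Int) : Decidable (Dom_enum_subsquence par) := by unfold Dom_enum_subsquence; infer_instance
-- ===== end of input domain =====

-- B replaces A's nested generator recursion by a peel-groups pass plus one iterative fold (alternative decomposition, same cost).

-- termination helper: the slice par[:tailstart] is strictly shorter than a nonempty par
theorem pv_slice_lt (par : List Int) (h : ¬ par = []) :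
    (PySem.List.slice par none (some ((((PySem.List.index? par (PySem.List.pyGetD par (-1) 0)).getD 0) : Nat) : Int))).length < par.length := by
  rw [PySem.List.slice_to_natCast]
  have hlen : 0 < par.length := List.length_pos_iff.mpr h
  rcases hidx : PySem.List.index? par (PySem.List.pyGetD par (-1) 0) with _ | k
  · simpa using hlen
  · obtain ⟨hk, -, -⟩ := PySem.List.getElem_of_index?_eq_some hidx
    simp [List.length_take]
    omega

-- ===== PORT A =====
def enum_subsquence (par : List Int) : List (List Int) :=
  if h : par = [] then [[]]
  else
    let tail := PySem.List.pyGetD par (-1) 0   -- par[-1]; in range since par ≠ []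
    let tailstart := (PySem.List.index? par tail).getD 0   -- par.index(tail); found since tail ∈ par
    let tailcount := par.length - tailstart
    (enum_subsquence (PySem.List.slice par none (some (tailstart : Int)))).flatMap
      (fun head =>
        ((PySem.List.pyRange 0 (tailcount : Int) 1).foldl
          (fun st _ => (st.1 ++ [tail], st.2 ++ [st.1 ++ [tail]]))
          (head, [head])).2)
termination_by par.length
decreasing_by exact pv_slice_lt par h

-- ===== PORT B =====
-- the while-loop peeling (v, len(p) - p.index(v)) groups off the end of p
def pvPeelGroups (p : List Int) : List (Int × Nat) :=
  if h : p = [] then []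
  else
    let v := PySem.List.pyGetD p (-1) 0
    let s := (PySem.List.index? p v).getD 0
    (v, p.length - s) :: pvPeelGroups (PySem.List.slice p none (some (s : Int)))
termination_by p.length
decreasing_by exact pv_slice_lt p h

def enum_subsquence_alt (par : List Int) : List (List Int) :=
  let groups := (pvPeelGroups par).reverse
  groups.foldl
    (fun acc vc =>
      acc.flatMap (fun h => (List.range (vc.2 + 1)).map (fun i => h ++ List.replicate i vc.1)))
    [[]]

-- ===== PRECONDITION & SPEC =====
def Spec_enum_subsquence (par : List Int) (out : List (List Int)) : Prop := out = enum_subsquence_alt par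
instance (par : List Int) (out : List (List Int)) : Decidable (Spec_enum_subsquence par out) := by unfold Spec_enum_subsquence; infer_instance

-- ===== CLAIM (what is proved, stated in full; the proofs are below) =====
def Claim_equal_enum_subsquence : Prop := ∀ (par : List Int), Dom_enum_subsquence par → Spec_enum_subsquence par (enum_subsquence par)

-- ===== LEMMAS AND PROOFS =====

-- A's inner cumulative fold, computed over any index list (the element is ignored)
theorem pv_inner_fold (tail : Int) (l : List Int) (h0 : List Int) (out : List (List Int)) :
    (l.foldl (fun st (_ : Int) => (st.1 ++ [tail], st.2 ++ [st.1 ++ [tail]])) (h0, out)).2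
      = out ++ (List.range l.length).map (fun i => h0 ++ List.replicate (i + 1) tail) := by
  induction l generalizing h0 out with
  | nil => simp
  | cons x xs ih =>
    simp only [List.foldl_cons, ih, List.length_cons, List.range_succ_eq_map]
    simp [List.replicate_succ, Function.comp]

theorem pv_inner (tail : Int) (count : Nat) (head : List Int) :
    ((PySem.List.pyRange 0 (count : Int) 1).foldl
        (fun st _ => (st.1 ++ [tail], st.2 ++ [st.1 ++ [tail]])) (head, [head])).2
      = (List.range (count + 1)).map (fun i => head ++ List.replicate i tail) := by
  rw [pv_inner_fold]
  have hlen : (PySem.List.pyRange 0 (count : Int) 1).length = count := by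
    simp [PySem.List.pyRange_zero_natCast]
  rw [hlen, List.range_succ_eq_map]
  simp [Function.comp]

theorem pv_main (par : List Int) :
    enum_subsquence par
      = ((pvPeelGroups par).reverse).foldl
          (fun acc vc =>
            acc.flatMap (fun h => (List.range (vc.2 + 1)).map (fun i => h ++ List.replicate i vc.1)))
          [[]] := by
  induction par using enum_subsquence.induct with
  | case1 => rw [enum_subsquence, pvPeelGroups]; simp
  | case2 par h tail tailstart ih =>
    rw [enum_subsquence, pvPeelGroups]
    simp only [h, dite_false, List.reverse_cons, List.foldl_append, List.foldl_cons, List.foldl_nil]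
    rw [← ih]
    congr 1
    funext head
    exact pv_inner tail (par.length - tailstart) head

-- ===== VERDICT (by name: the statement is the Claim_ definition above) =====
theorem enum_subsquence_spec : Claim_equal_enum_subsquence := by
  intro par _
  unfold Spec_enum_subsquence enum_subsquence_alt
  exact pv_main par
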